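-- pv_equiv track=rewrite | github.com/garysmith1933/DeriveIT | BinarySearch/max_value_less_than.py | maxValueLessThan
-- ===== SOURCE A (Python) =====
-- def maxValueLessThan(arr, high):
--     i, j = 0, len(arr) - 1
--     largest = None
--
--     while True:
--         if j == i - 1:
--             return largest
--
--         mid = (i + j) // 2
--
--         if arr[mid] < high:
--             largest = arr[mid]
--             i = mid + 1
--
--         else:
--             j = mid - 1
--
--     return largest
-- ===== SOURCE B (Python) =====
-- def maxValueLessThan(arr, high):
--     # Recursive divide-and-conquer over sublists (no index arithmetic on the
--     # whole array): each step keeps only the half of the current segment that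
--     # is still to be probed.
--     def go(seg, largest):
--         if not seg:
--             return largest
--         m = (len(seg) - 1) // 2
--         x = seg[m]
--         if x < high:
--             return go(seg[m + 1:], x)
--         else:
--             return go(seg[:m], largest)
--     return go(arr, None)
-- ===== Notes on version B (the rewrite author's own statement) =====
-- stated objective: alternative
-- what changed: Replaces the index-pair while-True loop with a recursive divide-and-conquer helper that recurses on the actual sublist (slicing away the discarded half) with an accumulator, instead of maintaining i/j cursors into the full array.
import Mathlib
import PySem

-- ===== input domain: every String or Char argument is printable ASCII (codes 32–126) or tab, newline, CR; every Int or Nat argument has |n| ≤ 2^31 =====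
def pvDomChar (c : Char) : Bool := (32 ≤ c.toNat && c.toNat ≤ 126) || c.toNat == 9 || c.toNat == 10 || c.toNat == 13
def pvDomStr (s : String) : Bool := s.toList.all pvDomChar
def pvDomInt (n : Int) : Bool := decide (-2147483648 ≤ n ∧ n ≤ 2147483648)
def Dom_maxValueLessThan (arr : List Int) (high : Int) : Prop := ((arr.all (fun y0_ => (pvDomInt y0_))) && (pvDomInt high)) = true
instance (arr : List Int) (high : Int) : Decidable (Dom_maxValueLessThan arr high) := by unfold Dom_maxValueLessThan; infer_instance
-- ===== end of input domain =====

-- B rewrites the index-pair while-loop as a recursive divide-and-conquer over sublists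
-- with an accumulator (objective: alternative); same values on every input.

-- ===== PORT A =====
-- A's 'while True' loop over the integer cursors i, j and the accumulator 'largest'.
-- The loop carries the proof 'i - 1 ≤ j' (true at entry and preserved) only for
-- termination; the 'none => none' arm is Python's IndexError and is unreachable
-- from the initial call (0 ≤ i and j < arr.length hold throughout).
def pvLoopA (arr : List Int) (high : Int) (i j : Int) (largest : Option Int)
    (hinv : i - 1 ≤ j) : Option Int :=
  if hj : j = i - 1 then largest
  else
    have hij : i ≤ j := by omega
    have hmid := PySem.Int.floordiv_two_mid_bounds hij
    match PySem.List.pyGet? arr (PySem.Int.floordiv (i + j) 2) with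
    | none => none
    | some x =>
      if x < high then
        pvLoopA arr high (PySem.Int.floordiv (i + j) 2 + 1) j (some x) (by omega)
      else
        pvLoopA arr high i (PySem.Int.floordiv (i + j) 2 - 1) largest (by omega)
termination_by (j + 1 - i).toNat
decreasing_by all_goals omega

def maxValueLessThan (arr : List Int) (high : Int) : Option Int :=
  pvLoopA arr high 0 ((arr.length : Int) - 1) none (by omega)

-- ===== PORT B =====
-- B's helper: recursion on the current segment (a sublist), probing its middle
-- element and recursing on the kept half; seg[m] is always in range (m < len).
def pvGoB (high : Int) (seg : List Int) (largest : Option Int) : Option Int :=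
  if h : seg = [] then largest
  else
    let m : Nat := (seg.length - 1) / 2
    match seg[m]? with
    | none => none
    | some x =>
      if x < high then pvGoB high (seg.drop (m + 1)) (some x)
      else pvGoB high (seg.take m) largest
termination_by seg.length
decreasing_by
  all_goals have hpos := List.length_pos_of_ne_nil h
  all_goals simp [List.length_drop, List.length_take]
  all_goals omega

def maxValueLessThan_alt (arr : List Int) (high : Int) : Option Int :=
  pvGoB high arr none

-- ===== PRECONDITION & SPEC =====
def Spec_maxValueLessThan (arr : List Int) (high : Int) (out : Option Int) : Prop := out = maxValueLessThan_alt arr high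
instance (arr : List Int) (high : Int) (out : Option Int) : Decidable (Spec_maxValueLessThan arr high out) := by unfold Spec_maxValueLessThan; infer_instance

-- ===== CLAIM (what is proved, stated in full; the proofs are below) =====
def Claim_equal_maxValueLessThan : Prop := ∀ (arr : List Int) (high : Int), Dom_maxValueLessThan arr high → Spec_maxValueLessThan arr high (maxValueLessThan arr high)

-- ===== LEMMAS AND PROOFS =====

-- Main invariant: A's loop on cursors (i, j) computes what B's recursion computes
-- on the segment arr[i..j] (= (arr.drop i.toNat).take (j + 1 - i).toNat).
theorem pvLoopA_eq_pvGoB (arr : List Int) (high : Int) :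
    ∀ (n : Nat) (i j : Int) (largest : Option Int) (hinv : i - 1 ≤ j),
      (j + 1 - i).toNat = n → 0 ≤ i → j < (arr.length : Int) →
      pvLoopA arr high i j largest hinv =
        pvGoB high ((arr.drop i.toNat).take (j + 1 - i).toNat) largest := by
  intro n
  induction n using Nat.strong_induction_on with
  | _ n ih =>
    intro i j largest hinv hn h0 hl
    have hseglen : ((arr.drop i.toNat).take (j + 1 - i).toNat).length = (j + 1 - i).toNat := by
      simp [List.length_take, List.length_drop]; omega
    rw [pvLoopA, pvGoB]
    by_cases hj : j = i - 1
    · have h0len : (j + 1 - i).toNat = 0 := by omega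
      rw [dif_pos hj, h0len]
      simp
    · have hij : i ≤ j := by omega
      have hmid := PySem.Int.floordiv_two_mid_bounds hij
      have hne : (arr.drop i.toNat).take (j + 1 - i).toNat ≠ [] := by
        intro h; rw [h] at hseglen; simp at hseglen; omega
      simp only [dif_neg hj, dif_neg hne]
      set mid := PySem.Int.floordiv (i + j) 2 with hmiddef
      have hfd : mid = (i + j) / 2 := PySem.Int.floordiv_eq_ediv_of_pos (by omega)
      have hm : (((arr.drop i.toNat).take (j + 1 - i).toNat).length - 1) / 2 = (mid - i).toNat := by
        rw [hseglen, hfd]; omega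
      have hmlt : (mid - i).toNat < (j + 1 - i).toNat := by omega
      have hidx : i.toNat + (mid - i).toNat = mid.toNat := by omega
      have hget : ((arr.drop i.toNat).take (j + 1 - i).toNat)[(mid - i).toNat]? =
          arr[mid.toNat]? := by
        rw [List.getElem?_take_of_lt hmlt, List.getElem?_drop, hidx]
      have hmidrange : mid.toNat < arr.length := by omega
      have hpg : PySem.List.pyGet? arr mid = some arr[mid.toNat] :=
        PySem.List.pyGet?_eq_some_getElem arr (by omega) (by omega)
      rw [hpg, hm, hget, List.getElem?_eq_getElem hmidrange]
      by_cases hx : arr[mid.toNat] < high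
      · simp only [if_pos hx]
        rw [ih (j - mid).toNat (by omega) (mid + 1) j _ (by omega) (by omega) (by omega) hl]
        have e1 : ((arr.drop i.toNat).take (j + 1 - i).toNat).drop ((mid - i).toNat + 1)
            = (arr.drop (mid + 1).toNat).take (j + 1 - (mid + 1)).toNat := by
          rw [List.drop_take, List.drop_drop]
          have ea : (j + 1 - i).toNat - ((mid - i).toNat + 1) = (j + 1 - (mid + 1)).toNat := by
            omega
          have eb : i.toNat + ((mid - i).toNat + 1) = (mid + 1).toNat := by omega
          rw [ea, eb]
        rw [e1]
      · simp only [if_neg hx]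
        rw [ih (mid - i).toNat (by omega) i (mid - 1) _ (by omega) (by omega) h0 (by omega)]
        rw [List.take_take]
        have e2 : min ((mid - i).toNat) ((j + 1 - i).toNat) = (mid - 1 + 1 - i).toNat := by
          omega
        rw [e2]

-- ===== VERDICT (by name: the statement is the Claim_ definition above) =====
theorem maxValueLessThan_spec : Claim_equal_maxValueLessThan := by
  intro arr high _
  unfold Spec_maxValueLessThan maxValueLessThan maxValueLessThan_alt
  rw [pvLoopA_eq_pvGoB arr high ((arr.length : Int) - 1 + 1 - 0).toNat 0 ((arr.length : Int) - 1)
      none (by omega) rfl le_rfl (by omega)]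
  congr 1
  simp
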